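-- pv_equiv track=rewrite | github.com/trernghwhuare/network-analysis-package | 0.py | create_concise_region_label
-- ===== SOURCE A (Python) =====
-- def create_concise_region_label(regions_list):
--     """Create a concise label for regions by grouping similar base regions.
--
--     Args:
--         regions_list: List of region names (e.g., ['M1a', 'M1b', 'S1a', 'S1b', 'M2a', 'M2b'])
--
--     Returns:
--         str: Concise region label (e.g., 'M1(a,b),S1(a,b),M2(a,b)')
--     """
--     if not regions_list:
--         return ""
--
--     # Group regions by base name (everything before the last character)
--     region_groups = {}
--     for region in regions_list:
--         if len(region) >= 2 and region[-1] in 'ab':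
--             # Region has variant suffix (a or b)
--             base_name = region[:-1]
--             variant = region[-1]
--             if base_name not in region_groups:
--                 region_groups[base_name] = []
--             region_groups[base_name].append(variant)
--         else:
--             # Region doesn't have variant suffix
--             if region not in region_groups:
--                 region_groups[region] = []
--
--     # Create concise labels for each group
--     concise_parts = []
--     for base_name in sorted(region_groups.keys()):
--         variants = sorted(region_groups[base_name])
--         if variants:
--             # Has variants like a, b
--             concise_parts.append(f"{base_name}({','.join(variants)})")
--         else:
--             # No variants, just the base name
--             concise_parts.append(base_name)
--
--     return ','.join(concise_parts)
-- ===== SOURCE B (Python) =====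
-- def create_concise_region_label(regions_list):
--     # Sort-then-scan decomposition: map each region to a (base, variant) pair
--     # ('' = no variant), sort the pairs once, then emit one label per run of
--     # equal bases in a single linear sweep.
--     pairs = []
--     for region in regions_list:
--         if len(region) >= 2 and region[-1] in 'ab':
--             pairs.append((region[:-1], region[-1]))
--         else:
--             pairs.append((region, ''))
--     pairs.sort()
--     parts = []
--     i = 0
--     n = len(pairs)
--     while i < n:
--         base = pairs[i][0]
--         variants = []
--         while i < n and pairs[i][0] == base:
--             if pairs[i][1]:
--                 variants.append(pairs[i][1])
--             i += 1
--         if variants: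
--             parts.append(f"{base}({','.join(variants)})")
--         else:
--             parts.append(base)
--     return ','.join(parts)
-- ===== Notes on version B (the rewrite author's own statement) =====
-- stated objective: alternative
-- what changed: Replaces A's mutable dict-of-lists accumulation with a sort-then-scan pipeline: map each region to a (base, variant) pair, sort the pairs once lexicographically, then emit one label per run of equal bases in a single linear sweep.
import Mathlib
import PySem

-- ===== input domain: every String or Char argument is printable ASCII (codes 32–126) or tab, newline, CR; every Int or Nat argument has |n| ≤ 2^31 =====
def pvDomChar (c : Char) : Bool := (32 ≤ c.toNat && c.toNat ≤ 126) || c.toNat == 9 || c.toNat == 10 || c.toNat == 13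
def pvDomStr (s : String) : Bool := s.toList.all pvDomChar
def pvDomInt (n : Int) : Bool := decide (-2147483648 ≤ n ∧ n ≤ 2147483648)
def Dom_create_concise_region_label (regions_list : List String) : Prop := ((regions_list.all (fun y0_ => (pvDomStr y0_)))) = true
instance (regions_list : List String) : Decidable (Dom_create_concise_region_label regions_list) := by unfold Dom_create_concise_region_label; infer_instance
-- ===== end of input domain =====

-- B replaces A's mutable dict-of-lists accumulation by mapping each region to a (base, variant) pair, sorting the pairs once and emitting one label per run of equal bases — an alternative decomposition, not faster.


-- ===== PORT A =====
-- loop body of A's first 'for region in regions_list' loop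
def pvA_step (d : PySem.Dict String (List String)) (region : String) : PySem.Dict String (List String) :=
  let cs := region.toList
  if 2 ≤ cs.length ∧ (PySem.List.pyGet? cs (-1) = some 'a' ∨ PySem.List.pyGet? cs (-1) = some 'b') then
    -- region[:-1] and region[-1]; the index is in range under the length guard, so .elim's default is unreachable
    let base_name := String.ofList (PySem.List.slice cs none (some (-1)))
    let variant := (PySem.List.pyGet? cs (-1)).elim "" (fun c => String.ofList [c])
    -- 'if base_name not in region_groups: region_groups[base_name] = []' then '.append(variant)'
    let d1 := if d.contains base_name then d else d.insert base_name []
    d1.modify base_name [] (· ++ [variant])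
  else
    if d.contains region then d else d.insert region []

def create_concise_region_label (regions_list : List String) : String :=
  if regions_list = [] then ""
  else
    let region_groups := regions_list.foldl pvA_step PySem.Dict.empty
    let concise_parts := (PySem.List.sorted region_groups.keys (fun x => x) false).map
      (fun base_name =>
        let variants := PySem.List.sorted (region_groups.getD base_name []) (fun x => x) false
        if variants ≠ [] then base_name ++ "(" ++ PySem.Str.join "," variants ++ ")" else base_name)
    PySem.Str.join "," concise_parts

-- ===== PORT B =====
-- the (base, variant) pair B builds for one region; '' = no variant (region[-1] is in range under the length guard, so .elim's default is unreachable)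
def pvB_pair (region : String) : String × String :=
  let cs := region.toList
  if 2 ≤ cs.length ∧ (PySem.List.pyGet? cs (-1) = some 'a' ∨ PySem.List.pyGet? cs (-1) = some 'b') then
    (String.ofList (PySem.List.slice cs none (some (-1))),
     (PySem.List.pyGet? cs (-1)).elim "" (fun c => String.ofList [c]))
  else (region, "")

-- B's outer while loop: one label per run of equal bases of the sorted pair list
-- (the inner while loop takes the run; the 'if pairs[i][1]' filter keeps the non-'' variants)
def pvB_chunks : List (String × String) → List String
  | [] => []
  | (b, v) :: t =>
    let grp := (b, v) :: List.takeWhile (fun p => p.1 == b) t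
    let rest := List.dropWhile (fun p => p.1 == b) t
    let variants := (grp.filter (fun p => p.2 != "")).map (·.2)
    (if variants ≠ [] then b ++ "(" ++ PySem.Str.join "," variants ++ ")" else b) :: pvB_chunks rest
termination_by l => l.length
decreasing_by
  simpa using Nat.lt_succ_of_le ((List.dropWhile_sublist _).length_le)

def create_concise_region_label_alt (regions_list : List String) : String :=
  let pairs := PySem.List.sorted2 (regions_list.map pvB_pair) (fun p => p.1) (fun p => p.2) false
  PySem.Str.join "," (pvB_chunks pairs)

-- ===== PRECONDITION & SPEC =====
def Spec_create_concise_region_label (regions_list : List String) (out : String) : Prop := out = create_concise_region_label_alt regions_list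
instance (regions_list : List String) (out : String) : Decidable (Spec_create_concise_region_label regions_list out) := by unfold Spec_create_concise_region_label; infer_instance

-- ===== CLAIM (what is proved, stated in full; the proofs are below) =====
def Claim_equal_create_concise_region_label : Prop := ∀ (regions_list : List String), Dom_create_concise_region_label regions_list → Spec_create_concise_region_label regions_list (create_concise_region_label regions_list)

-- ===== LEMMAS AND PROOFS =====

-- Python's lexicographic order on the pairs B sorts
def pvLexLE (p q : String × String) : Prop := p.1 < q.1 ∨ (p.1 = q.1 ∧ p.2 ≤ q.2)

-- the Bool comparison sorted2 uses
def pvLt (a b : String × String) : Bool :=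
  decide (a.1 < b.1) || (!decide (b.1 < a.1) && decide (a.2 < b.2))

theorem pvLexLE_trans : Transitive pvLexLE := by
  rintro ⟨a1, a2⟩ ⟨b1, b2⟩ ⟨c1, c2⟩ (h | ⟨h, h2⟩) (g | ⟨g, g2⟩)
  · exact Or.inl (lt_trans h g)
  · exact Or.inl (g ▸ h)
  · exact Or.inl (h ▸ g)
  · exact Or.inr ⟨h.trans g, le_trans h2 g2⟩

theorem pvLt_true (a b : String × String) (h : pvLt a b = true) : pvLexLE a b := by
  unfold pvLt at h
  unfold pvLexLE
  rcases Bool.or_eq_true_iff.mp h with h | h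
  · exact Or.inl (of_decide_eq_true h)
  · rcases Bool.and_eq_true_iff.mp h with ⟨h1, h2⟩
    have h1' : ¬ b.1 < a.1 := of_decide_eq_false (by simpa using h1)
    rcases lt_or_ge a.1 b.1 with hlt | hge
    · exact Or.inl hlt
    · exact Or.inr ⟨le_antisymm hge (le_of_not_gt h1') ▸ rfl, le_of_lt (of_decide_eq_true h2)⟩

theorem pvLt_false (a b : String × String) (h : pvLt a b = false) : pvLexLE b a := by
  unfold pvLt at h
  unfold pvLexLE
  rcases Bool.or_eq_false_iff.mp h with ⟨h1, h2⟩
  have h1' : ¬ a.1 < b.1 := of_decide_eq_false h1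
  by_cases hba : b.1 < a.1
  · exact Or.inl hba
  · have he : b.1 = a.1 := le_antisymm (not_lt.mp h1') (not_lt.mp hba)
    have h3 : decide (a.2 < b.2) = false := by
      have : (!decide (b.1 < a.1)) = true := by simp [hba]
      rcases Bool.and_eq_false_iff.mp h2 with h | h
      · rw [this] at h; cases h
      · exact h
    exact Or.inr ⟨he, le_of_not_gt (of_decide_eq_false h3)⟩

theorem pv_insertBy_pairwise (x : String × String) (ys : List (String × String))
    (h : List.Pairwise pvLexLE ys) :
    List.Pairwise pvLexLE (PySem.List.insertBy pvLt x ys) := by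
  induction ys with
  | nil => simp [PySem.List.insertBy]
  | cons y ys ih =>
    rw [show PySem.List.insertBy pvLt x (y :: ys) =
      if pvLt x y then x :: y :: ys else y :: PySem.List.insertBy pvLt x ys from rfl]
    rcases List.pairwise_cons.mp h with ⟨hy, hys⟩
    by_cases hb : pvLt x y
    · simp only [hb, if_true]
      refine List.pairwise_cons.mpr ⟨?_, h⟩
      intro z hz
      rcases List.mem_cons.mp hz with rfl | hz
      · exact pvLt_true _ _ hb
      · exact pvLexLE_trans (pvLt_true _ _ hb) (hy z hz)
    · simp only [hb, if_false]
      refine List.pairwise_cons.mpr ⟨?_, ih hys⟩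
      intro z hz
      rcases (PySem.List.insertBy_mem_iff _ _ _ _).mp hz with rfl | hz
      · exact pvLt_false _ _ (by simpa using hb)
      · exact hy z hz

theorem pv_sorted2_pairwise (ps : List (String × String)) :
    List.Pairwise pvLexLE (PySem.List.sorted2 ps (fun p => p.1) (fun p => p.2) false) := by
  have he : PySem.List.sorted2 ps (fun p => p.1) (fun p => p.2) false =
      ps.foldl (fun acc x => PySem.List.insertBy pvLt x acc) [] := rfl
  rw [he]
  have : ∀ (l : List (String × String)) (acc : List (String × String)),
      List.Pairwise pvLexLE acc →
      List.Pairwise pvLexLE (l.foldl (fun acc x => PySem.List.insertBy pvLt x acc) acc) := by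
    intro l
    induction l with
    | nil => intro acc h; simpa using h
    | cons x xs ih => intro acc h; exact ih _ (pv_insertBy_pairwise x acc h)
  exact this ps [] (by simp)

-- ============ A-side characterisation (dict loop) ============

theorem pvA_step_keys (d : PySem.Dict String (List String)) (r : String) :
    (pvA_step d r).keys = PySem.Set.add d.keys (pvB_pair r).1 := by
  unfold pvA_step pvB_pair
  by_cases hc : 2 ≤ r.toList.length ∧ (PySem.List.pyGet? r.toList (-1) = some 'a' ∨ PySem.List.pyGet? r.toList (-1) = some 'b')
  · simp only [hc, if_true, if_pos]
    set b := String.ofList (PySem.List.slice r.toList none (some (-1)))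
    by_cases h : d.contains b
    · simp [h, PySem.Dict.keys_modify, PySem.Set.add, PySem.Set.contains,
        ← PySem.Dict.contains_iff_mem_keys, PySem.Dict.keys_insert_of_contains _ _ h]
    · simp [h, PySem.Dict.keys_modify, PySem.Dict.insert_insert_self,
        PySem.Dict.keys_insert_of_not_contains _ _ (by simpa using h),
        PySem.Set.add, PySem.Set.contains, ← PySem.Dict.contains_iff_mem_keys]
  · simp only [hc, if_false]
    by_cases h : d.contains r
    · simp [PySem.Set.add, PySem.Set.contains, ← PySem.Dict.contains_iff_mem_keys, h]
    · simp [PySem.Set.add, PySem.Set.contains, ← PySem.Dict.contains_iff_mem_keys, h,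
        PySem.Dict.keys_insert_of_not_contains _ _ (by simpa using h)]

theorem pvA_step_getD (d : PySem.Dict String (List String)) (r b : String) :
    (pvA_step d r).getD b [] =
      d.getD b [] ++ (if (pvB_pair r).1 == b && (pvB_pair r).2 != ""
                      then [(pvB_pair r).2] else []) := by
  unfold pvA_step pvB_pair
  by_cases hc : 2 ≤ r.toList.length ∧ (PySem.List.pyGet? r.toList (-1) = some 'a' ∨ PySem.List.pyGet? r.toList (-1) = some 'b')
  · simp only [hc, if_true, if_pos]
    set bn := String.ofList (PySem.List.slice r.toList none (some (-1)))
    have hs : (PySem.List.pyGet? r.toList (-1)).isSome := by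
      rcases hc.2 with h | h <;> simp [h]
    have hne : ((PySem.List.pyGet? r.toList (-1)).elim "" (fun c => String.ofList [c])) ≠ "" := by
      cases hg : PySem.List.pyGet? r.toList (-1) with
      | none => simp [hg] at hs
      | some c => simp [hg, Option.elim]
    by_cases hb : bn = b
    · subst hb
      by_cases h : d.contains bn
      · simp [h, PySem.Dict.getD_modify_self, hne]
      · simp [h, PySem.Dict.getD_modify_self, PySem.Dict.getD_insert_self,
          PySem.Dict.getD_of_not_contains _ _ (by simpa using h), hne]
    · have hb' : (bn == b) = false := by simp [hb]
      by_cases h : d.contains bn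
      · simp [h, PySem.Dict.getD_modify_of_ne _ _ _ (Ne.symm hb), hb']
      · simp [h, PySem.Dict.getD_modify_of_ne _ _ _ (Ne.symm hb),
          PySem.Dict.getD_insert_of_ne _ _ _ (Ne.symm hb), hb']
  · simp only [hc, if_false]
    by_cases h : d.contains r
    · simp [h]
    · by_cases hb : r = b
      · subst hb
        simp [h, PySem.Dict.getD_insert_self, PySem.Dict.getD_of_not_contains _ _ (by simpa using h)]
      · simp [h, PySem.Dict.getD_insert_of_ne _ _ _ (Ne.symm hb), hb]

theorem foldl_keys (regions : List String) :
    ∀ (d : PySem.Dict String (List String)),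
      (regions.foldl pvA_step d).keys =
        PySem.Set.update d.keys (regions.map (fun r => (pvB_pair r).1)) := by
  induction regions with
  | nil => intro d; simp [PySem.Set.update]
  | cons r rs ih =>
    intro d
    simp only [List.foldl_cons, List.map_cons]
    rw [ih, pvA_step_keys]
    simp [PySem.Set.update]

theorem foldl_getD (regions : List String) :
    ∀ (d : PySem.Dict String (List String)) (b : String),
      (regions.foldl pvA_step d).getD b [] =
        d.getD b [] ++ ((regions.map pvB_pair).filter
          (fun p => p.1 == b && p.2 != "")).map (fun p => p.2) := by
  induction regions with
  | nil => intro d b; simp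
  | cons r rs ih =>
    intro d b
    simp only [List.foldl_cons, List.map_cons, List.filter_cons]
    rw [ih, pvA_step_getD]
    by_cases hq : ((pvB_pair r).1 == b && (pvB_pair r).2 != "") = true
    · simp [hq]
    · simp [hq]

-- ============ dedup over a run ============

theorem pv_update_cons (b : String) :
    ∀ (ys : List String) (s : List String), b ∉ ys →
      PySem.Set.update (b :: s) ys = b :: PySem.Set.update s ys := by
  intro ys
  induction ys with
  | nil => intro s _; rfl
  | cons y ys ih =>
    intro s hb
    have hyb : y ≠ b := fun h => hb (by simp [h])
    have hadd : PySem.Set.add (b :: s) y = b :: PySem.Set.add s y := by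
      simp only [PySem.Set.add, PySem.Set.contains, List.contains_cons]
      have : (y == b) = false := by simp [hyb]
      rw [this, Bool.false_or]
      split_ifs <;> simp
    calc PySem.Set.update (b :: s) (y :: ys)
        = PySem.Set.update (PySem.Set.add (b :: s) y) ys := rfl
      _ = PySem.Set.update (b :: PySem.Set.add s y) ys := by rw [hadd]
      _ = b :: PySem.Set.update (PySem.Set.add s y) ys := ih _ (fun h => hb (by simp [h]))
      _ = b :: PySem.Set.update s (y :: ys) := rfl

theorem pv_ofList_const (b : String) :
    ∀ (xs : List String), (∀ x ∈ xs, x = b) →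
      ((PySem.Set.ofList xs).discard b = [] ∧ (xs ≠ [] → PySem.Set.ofList xs = [b])) := by
  intro xs
  induction xs with
  | nil => intro _; exact ⟨rfl, fun h => absurd rfl h⟩
  | cons x xs ih =>
    intro hall
    have hx : x = b := hall x (by simp)
    subst hx
    have ihx := ih (fun z hz => hall z (by simp [hz]))
    have hof : PySem.Set.ofList (x :: xs) = [x] := by
      rw [PySem.Set.ofList_cons, ihx.1]
    refine ⟨?_, fun _ => hof⟩
    rw [hof]
    simp [PySem.Set.discard]

theorem pv_dedup_run (b : String) (xs ys : List String) (hne : xs ≠ [])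
    (hall : ∀ x ∈ xs, x = b) (hb : b ∉ ys) :
    PySem.List.dedup (xs ++ ys) = b :: PySem.List.dedup ys := by
  rw [PySem.List.dedup_eq_ofList, PySem.Set.ofList_append,
    (pv_ofList_const b xs hall).2 hne,
    show ([b] : List String) = b :: [] from rfl,
    pv_update_cons b ys [] hb, PySem.Set.update_nil_left, PySem.List.dedup_eq_ofList]

theorem pv_dedup_sublist (xs : List String) : (PySem.List.dedup xs).Sublist xs := by
  rw [PySem.List.dedup_eq_ofList]
  induction xs with
  | nil => simp
  | cons x xs ih =>
    rw [PySem.Set.ofList_cons]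
    refine List.Sublist.cons₂ x ?_
    exact List.Sublist.trans (by simpa [PySem.Set.discard] using List.filter_sublist) ih

-- ============ chunks over a sorted list ============

theorem pv_chunks_eq : ∀ (n : Nat) (ps : List (String × String)), ps.length ≤ n →
    List.Pairwise pvLexLE ps →
    pvB_chunks ps = (PySem.List.dedup (ps.map (fun p => p.1))).map (fun b =>
      let vs := (ps.filter (fun p => p.1 == b && p.2 != "")).map (fun p => p.2)
      if vs ≠ [] then b ++ "(" ++ PySem.Str.join "," vs ++ ")" else b) := by
  intro n
  induction n with
  | zero =>
    intro ps hl _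
    have : ps = [] := List.length_eq_zero_iff.mp (Nat.le_zero.mp hl)
    subst this
    simp [pvB_chunks]
  | succ n ih =>
    intro ps hl hp
    match ps with
    | [] => simp [pvB_chunks]
    | (b, v) :: t =>
      have hsplit : (b, v) :: t =
          ((b, v) :: t.takeWhile (fun p => p.1 == b)) ++ t.dropWhile (fun p => p.1 == b) := by
        simp [List.takeWhile_append_dropWhile]
      set grp := (b, v) :: t.takeWhile (fun p => p.1 == b) with hgrp
      set rest := t.dropWhile (fun p => p.1 == b) with hrestdef
      have hgrpall : ∀ p ∈ grp, p.1 = b := by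
        intro p hpm
        rcases List.mem_cons.mp hpm with rfl | hpm
        · rfl
        · simpa using List.mem_takeWhile_imp hpm
      have hrest_sub_t : rest.Sublist t := List.dropWhile_sublist _
      have hrest_pw : List.Pairwise pvLexLE rest :=
        List.Pairwise.sublist (hrest_sub_t.cons _) hp
      have hrestne : ∀ p ∈ rest, p.1 ≠ b := by
        cases hr : rest with
        | nil => intro p hpm; simp at hpm
        | cons r0 rs =>
          have hr0 : (fun p : String × String => p.1 == b) r0 = false := by
            have := List.head?_dropWhile_not (fun p : String × String => p.1 == b) t
            rw [← hrestdef, hr] at this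
            simpa using this
          have hr0b : r0.1 ≠ b := by simpa using hr0
          have hr0mem : r0 ∈ t := hrest_sub_t.mem (hr ▸ List.mem_cons_self)
          have hbv : pvLexLE (b, v) r0 := (List.pairwise_cons.mp hp).1 r0 hr0mem
          have hlt : b < r0.1 := by
            rcases hbv with h | ⟨h, _⟩
            · exact h
            · exact absurd h.symm hr0b
          intro p hpm
          rcases List.mem_cons.mp hpm with rfl | hpm
          · exact hr0b
          · have : pvLexLE r0 p := (List.pairwise_cons.mp (hr ▸ hrest_pw)).1 p hpm
            have hle : r0.1 ≤ p.1 := by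
              rcases this with h | ⟨h, _⟩
              · exact le_of_lt h
              · exact le_of_eq h
            exact fun hh => absurd (hh ▸ hle) (not_le.mpr hlt)
      have hbnotin : b ∉ rest.map (fun p : String × String => p.1) := by
        intro hmem
        rcases List.mem_map.mp hmem with ⟨p, hpm, hpe⟩
        exact hrestne p hpm hpe
      have hdedup : PySem.List.dedup (((b, v) :: t).map (fun p => p.1)) =
          b :: PySem.List.dedup (rest.map (fun p => p.1)) := by
        rw [show ((b, v) :: t).map (fun p : String × String => p.1) =
          grp.map (fun p => p.1) ++ rest.map (fun p => p.1) by
            rw [← List.map_append, ← hsplit]]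
        exact pv_dedup_run b _ _ (by simp [hgrp]) (by
          intro x hx
          rcases List.mem_map.mp hx with ⟨p, hpm, hpe⟩
          exact hpe ▸ hgrpall p hpm) hbnotin
      have hfilter_split : ∀ b' : String,
          ((b, v) :: t).filter (fun p => p.1 == b' && p.2 != "") =
          grp.filter (fun p => p.1 == b' && p.2 != "") ++
          rest.filter (fun p => p.1 == b' && p.2 != "") := by
        intro b'
        rw [← List.filter_append, ← hsplit]
      have hlen : rest.length ≤ n := by
        have := hrest_sub_t.length_le
        simp only [List.length_cons] at hl
        omega
      have hIH := ih rest hlen hrest_pw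
      rw [pvB_chunks, hdedup, List.map_cons]
      congr 1
      · -- head part: grp's variants are exactly the full filter for b
        have h1 : ((b, v) :: t).filter (fun p => p.1 == b && p.2 != "") =
            grp.filter (fun p => p.2 != "") := by
          have hnil' : rest.filter (fun p => p.1 == b && p.2 != "") = [] :=
            List.filter_eq_nil_iff.mpr (fun p hpm => by simp [hrestne p hpm])
          rw [hfilter_split b, hnil', List.append_nil]
          exact List.filter_congr (fun p hpm => by simp [hgrpall p hpm])
        rw [h1]
      · -- tail: every later base misses grp entirely
        rw [hIH]
        apply List.map_congr_left
        intro b' hb'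
        have hb'mem : b' ∈ rest.map (fun p : String × String => p.1) :=
          (PySem.List.mem_dedup _ _).mp hb'
        have hb'ne : b' ≠ b := fun h => hbnotin (h ▸ hb'mem)
        have h2 : ((b, v) :: t).filter (fun p => p.1 == b' && p.2 != "") =
            rest.filter (fun p => p.1 == b' && p.2 != "") := by
          have hnil' : grp.filter (fun p => p.1 == b' && p.2 != "") = [] :=
            List.filter_eq_nil_iff.mpr (fun p hpm => by
              simp [hgrpall p hpm, Ne.symm hb'ne])
          rw [hfilter_split b', hnil', List.nil_append]
        simp only [h2]

-- all of qs's pair-firsts, deduped, strictly increasing (qs sorted lex)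
theorem pv_dedup_fst_pairwise_lt (qs : List (String × String))
    (hpw : List.Pairwise pvLexLE qs) :
    List.Pairwise (· < ·) (PySem.List.dedup (qs.map (fun p => p.1))) := by
  have hle : List.Pairwise (fun a b : String => a ≤ b) (qs.map (fun p => p.1)) := by
    rw [List.pairwise_map]
    exact hpw.imp (fun h => by
      rcases h with h | ⟨h, _⟩
      · exact le_of_lt h
      · exact le_of_eq h)
  have hsub := pv_dedup_sublist (qs.map (fun p => p.1))
  have hle' := List.Pairwise.sublist hsub hle
  have hnd : (PySem.List.dedup (qs.map (fun p => p.1))).Nodup := by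
    rw [PySem.List.dedup_eq_ofList]; exact PySem.Set.nodup_ofList _
  exact (hle'.and hnd).imp (fun ⟨h1, h2⟩ => lt_of_le_of_ne h1 h2)

-- ===== VERDICT (by name: the statement is the Claim_ definition above) =====
theorem create_concise_region_label_spec : Claim_equal_create_concise_region_label := by
  unfold Claim_equal_create_concise_region_label
  intro regions _
  unfold Spec_create_concise_region_label create_concise_region_label create_concise_region_label_alt
  by_cases hnil : regions = []
  · subst hnil; simp [pvB_chunks, PySem.List.sorted2, PySem.Str.join]
  · simp only [hnil, if_false]
    have hqpw : List.Pairwise pvLexLE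
        (PySem.List.sorted2 (regions.map pvB_pair) (fun p => p.1) (fun p => p.2) false) :=
      pv_sorted2_pairwise _
    have hqperm : (PySem.List.sorted2 (regions.map pvB_pair) (fun p => p.1) (fun p => p.2) false).Perm
        (regions.map pvB_pair) := PySem.List.sorted2_perm _ _ _ _
    set qs := PySem.List.sorted2 (regions.map pvB_pair) (fun p => p.1) (fun p => p.2) false with hqs
    rw [pv_chunks_eq qs.length qs le_rfl hqpw]
    congr 1
    have hk : (regions.foldl pvA_step PySem.Dict.empty).keys =
        PySem.List.dedup (regions.map (fun r => (pvB_pair r).1)) := by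
      rw [foldl_keys]
      rw [PySem.List.dedup_eq_ofList, ← PySem.Set.update_nil_left]
      congr 1
    rw [hk]
    have hsorted : PySem.List.sorted (PySem.List.dedup (regions.map (fun r => (pvB_pair r).1)))
        (fun x => x) false = PySem.List.dedup (qs.map (fun p => p.1)) := by
      apply PySem.List.sorted_eq_of_perm_of_pairwise_lt
      · apply (List.perm_ext_iff_of_nodup ?_ ?_).mpr
        · intro a
          rw [PySem.List.mem_dedup, PySem.List.mem_dedup]
          rw [(hqperm.map (fun p : String × String => p.1)).mem_iff]
          rw [List.map_map]
          rfl
        · rw [PySem.List.dedup_eq_ofList]; exact PySem.Set.nodup_ofList _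
        · rw [PySem.List.dedup_eq_ofList]; exact PySem.Set.nodup_ofList _
      · exact pv_dedup_fst_pairwise_lt qs hqpw
    rw [hsorted]
    apply List.map_congr_left
    intro b _
    have hvs : PySem.List.sorted ((regions.foldl pvA_step PySem.Dict.empty).getD b [])
        (fun x => x) false =
        (qs.filter (fun p => p.1 == b && p.2 != "")).map (fun p => p.2) := by
      rw [foldl_getD]
      simp only [PySem.Dict.getD_empty, List.nil_append]
      apply List.Perm.eq_of_pairwise (le := fun a b : String => a ≤ b)
      · intro x y _ _ h1 h2; exact le_antisymm h1 h2
      · exact PySem.List.sorted_pairwise _ _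
      · rw [List.pairwise_map]
        refine ((hqpw.filter _).imp_of_mem ?_)
        intro p q hpm hqm hpq
        have hpb : p.1 = b := by
          have h' := (List.mem_filter.mp hpm).2
          simp at h'
          exact h'.1
        have hqb : q.1 = b := by
          have h' := (List.mem_filter.mp hqm).2
          simp at h'
          exact h'.1
        rcases hpq with h | ⟨_, h⟩
        · rw [hpb, hqb] at h
          exact absurd h (lt_irrefl b)
        · exact h
      · have p1 := PySem.List.sorted_perm (((regions.map pvB_pair).filter
            (fun p => p.1 == b && p.2 != "")).map (fun p => p.2)) (fun x => x) false
        have p2 := ((hqperm.filter (fun p => p.1 == b && p.2 != "")).map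
            (fun p : String × String => p.2)).symm
        exact p1.trans p2
    rw [hvs]
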